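-- pv_equiv track=rewrite | github.com/leventeantaloczy/LegoVerseny | matrixCalc.py | leaveOneEnd
-- ===== SOURCE A (Python) =====
-- def leaveOneEnd(Matrix, which): #unicolor matrixban bent hagyja a megadott sorszamu ertekes celt, a tobbit falla alakitja es visszaadja az igy kapott matrixot es a celkoordinatat
-- 	h = len(Matrix)
-- 	w = len(Matrix[0])
-- 	number = 0
-- 	outX = 0
-- 	outY = 0
-- 	filteredMatrix = [[0 for x in range(w)] for y in range(h)]
-- 	for y in range(h):
-- 		for x in range(w):
-- 			item = Matrix[y][x]
-- 			if(item == 2):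
-- 				if(number == which):
-- 					filteredMatrix[y][x] = 2
-- 					outX = x
-- 					if(y + 1 > h - 1):
-- 						outY = y
-- 					else:
-- 						outY = y + 1
-- 				else:
-- 					filteredMatrix[y][x] = 0
-- 				number += 1
-- 			else:
-- 				filteredMatrix[y][x] = item
-- 	return filteredMatrix, outX, outY
-- ===== SOURCE B (Python) =====
-- def leaveOneEnd(Matrix, which):
--     h = len(Matrix)
--     w = len(Matrix[0])
--     grid = [row[:w] for row in Matrix]
--     targets = [(y, x) for y in range(h) for x in range(w) if grid[y][x] == 2]
--     filtered = [[0 if v == 2 else v for v in row] for row in grid]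
--     outX = 0
--     outY = 0
--     if 0 <= which < len(targets):
--         ty, tx = targets[which]
--         filtered[ty][tx] = 2
--         outX = tx
--         outY = ty if ty + 1 > h - 1 else ty + 1
--     return filtered, outX, outY
-- ===== Notes on version B (the rewrite author's own statement) =====
-- stated objective: alternative
-- what changed: B replaces A's single stateful scan (running target counter, in-place cell writes and output coordinates updated inside the loop) by three independent passes: build the row-major list of target coordinates, blanket-filter every 2 to 0, then patch targets[which] back to 2 and read the output coordinates off that one tuple.
import Mathlib
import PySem

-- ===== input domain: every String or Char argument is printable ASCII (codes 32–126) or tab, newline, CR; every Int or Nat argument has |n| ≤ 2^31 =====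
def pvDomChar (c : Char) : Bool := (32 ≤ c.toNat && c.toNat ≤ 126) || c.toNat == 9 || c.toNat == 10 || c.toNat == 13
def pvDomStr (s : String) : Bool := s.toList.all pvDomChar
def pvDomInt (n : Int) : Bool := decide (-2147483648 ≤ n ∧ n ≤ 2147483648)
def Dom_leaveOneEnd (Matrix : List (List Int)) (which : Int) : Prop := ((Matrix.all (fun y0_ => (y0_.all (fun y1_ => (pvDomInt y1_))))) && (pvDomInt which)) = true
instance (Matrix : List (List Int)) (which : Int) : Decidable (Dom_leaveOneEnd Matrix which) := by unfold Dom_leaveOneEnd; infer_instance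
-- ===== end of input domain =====

-- B rebuilds the result in three independent passes (target-coordinate list, blanket 2→0 filter, one patch at targets[which]) instead of A's single stateful scan with a running counter; objective: alternative decomposition, same asymptotic cost.

-- ===== PORT A =====
-- literal transliteration of A: preallocated zero matrix, nested loops over range h / range w,
-- state (filteredMatrix, outX, outY, number); cell writes become List.modify/List.set.
def leaveOneEnd (Matrix : List (List Int)) (which : Int) : List (List Int) × Int × Int :=
  let h := Matrix.length
  let w := Matrix.headI.length
  let fin :=
    (List.range h).foldl (fun st y =>
      (List.range w).foldl (fun st x =>
        let item := (Matrix.getD y []).getD x 0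
        if item = 2 then
          if st.2.2.2 = which then
            (st.1.modify y (fun r => r.set x 2), (x : Int),
             (if (y : Int) + 1 > (h : Int) - 1 then (y : Int) else (y : Int) + 1),
             st.2.2.2 + 1)
          else
            (st.1.modify y (fun r => r.set x 0), st.2.1, st.2.2.1, st.2.2.2 + 1)
        else
          (st.1.modify y (fun r => r.set x item), st.2.1, st.2.2.1, st.2.2.2)) st)
      (List.replicate h (List.replicate w (0 : Int)), (0 : Int), (0 : Int), (0 : Int))
  (fin.1, fin.2.1, fin.2.2.1)

-- ===== PORT B =====
-- transliteration of Source B: truncated grid, target-coordinate list, filtered copy, one patch.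
def leaveOneEnd_alt (Matrix : List (List Int)) (which : Int) : List (List Int) × Int × Int :=
  let h := Matrix.length
  let w := Matrix.headI.length
  let grid := Matrix.map (fun row => row.take w)
  let targets := (List.range h).flatMap (fun y =>
    (List.range w).filterMap (fun x =>
      if (grid.getD y []).getD x 0 = 2 then some (y, x) else none))
  let filtered := grid.map (fun row => row.map (fun v => if v = 2 then 0 else v))
  if 0 ≤ which ∧ which < (targets.length : Int) then
    let t := targets.getD which.toNat (0, 0)
    (filtered.modify t.1 (fun r => r.set t.2 2), (t.2 : Int),
     if (t.1 : Int) + 1 > (h : Int) - 1 then (t.1 : Int) else (t.1 : Int) + 1)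
  else
    (filtered, 0, 0)

-- ===== PRECONDITION & SPEC =====
-- Pre_ excludes exactly the inputs on which A raises IndexError: the empty matrix
-- (len(Matrix[0]) fails) and matrices with a row shorter than the first row
-- (Matrix[y][x] fails); A returns normally on every other input.
def Pre_leaveOneEnd (Matrix : List (List Int)) (which : Int) : Prop :=
  Matrix ≠ [] ∧ ∀ row ∈ Matrix, Matrix.headI.length ≤ row.length
instance (Matrix : List (List Int)) (which : Int) : Decidable (Pre_leaveOneEnd Matrix which) := by
  unfold Pre_leaveOneEnd; infer_instance
def pvWitness_leaveOneEnd : List (List Int) × Int := ([[2, 0], [1, 2]], 1)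

def Spec_leaveOneEnd (Matrix : List (List Int)) (which : Int) (out : List (List Int) × Int × Int) : Prop := out = leaveOneEnd_alt Matrix which
instance (Matrix : List (List Int)) (which : Int) (out : List (List Int) × Int × Int) : Decidable (Spec_leaveOneEnd Matrix which out) := by unfold Spec_leaveOneEnd; infer_instance

-- ===== CLAIM (what is proved, stated in full; the proofs are below) =====
def Claim_equal_leaveOneEnd : Prop := ∀ (Matrix : List (List Int)) (which : Int), Dom_leaveOneEnd Matrix which → Pre_leaveOneEnd Matrix which → Spec_leaveOneEnd Matrix which (leaveOneEnd Matrix which)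

-- ===== LEMMAS AND PROOFS =====

-- scalar state: (outX, outY, number)
-- effect of A on one cell: (new cell value, new scalar state)
def cellA (which : Int) (h y x : Nat) (v : Int) (s : Int × Int × Int) : Int × Int × Int × Int :=
  if v = 2 then
    if s.2.2 = which then
      (2, (x : Int), (if (y : Int) + 1 > (h : Int) - 1 then (y : Int) else (y : Int) + 1), s.2.2 + 1)
    else (0, s.1, s.2.1, s.2.2 + 1)
  else (v, s.1, s.2.1, s.2.2)

-- structural recursion computing one row of A's scan (x = absolute column of the head)
def rowGo (which : Int) (h y : Nat) : Nat → List Int → Int × Int × Int → List Int × (Int × Int × Int)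
  | _, [], s => ([], s)
  | x, v :: vs, s =>
      let c := cellA which h y x v s
      let rest := rowGo which h y (x + 1) vs c.2
      (c.1 :: rest.1, rest.2)

-- structural recursion computing A's whole scan over a list of rows (y = row index of head)
def matGo (which : Int) (h : Nat) : Nat → List (List Int) → Int × Int × Int → List (List Int) × (Int × Int × Int)
  | _, [], s => ([], s)
  | y, r :: rs, s =>
      let row := rowGo which h y 0 r s
      let rest := matGo which h (y + 1) rs row.2
      (row.1 :: rest.1, rest.2)

-- positions of 2s in a row, offset by x
def rowT : List Int → Nat → List Nat
  | [], _ => []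
  | v :: vs, x => if v = 2 then x :: rowT vs (x + 1) else rowT vs (x + 1)

-- coordinates of 2s in a list of rows, rows offset by y
def tgts : List (List Int) → Nat → List (Nat × Nat)
  | [], _ => []
  | r :: rs, y => (rowT r 0).map (fun j => (y, j)) ++ tgts rs (y + 1)

def filt (row : List Int) : List Int := row.map (fun v => if v = 2 then 0 else v)

theorem modify_cons_succ {α : Type} (a : α) (t : List α) (n : Nat) (f : α → α) :
    (a :: t).modify (n + 1) f = a :: t.modify n f := by
  simp only [List.modify, List.modifyTailIdx_succ_cons]

theorem modify_id' {α : Type} (l : List α) (i : Nat) : l.modify i (fun a => a) = l := by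
  induction l generalizing i with
  | nil => simp
  | cons a t ih =>
    cases i with
    | zero => simp [List.modify]
    | succ n => rw [modify_cons_succ, ih]

theorem modify_modify {α : Type} (l : List α) (i : Nat) (f g : α → α) :
    (l.modify i f).modify i g = l.modify i (fun a => g (f a)) := by
  induction l generalizing i with
  | nil => simp
  | cons a t ih =>
    cases i with
    | zero => simp [List.modify]
    | succ n => rw [modify_cons_succ, modify_cons_succ, modify_cons_succ, ih]

theorem modify_eq_set {α : Type} (l : List α) (i : Nat) (f : α → α) (d : α) (hi : i < l.length) :
    l.modify i f = l.set i (f (l.getD i d)) := by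
  induction l generalizing i with
  | nil => simp at hi
  | cons a t ih =>
    cases i with
    | zero => simp [List.modify]
    | succ n =>
      rw [modify_cons_succ, List.set_cons_succ, List.getD_cons_succ, ih]
      simpa using hi

theorem foldl_modify_split {σ : Type} (y : Nat) (F : Nat → σ → Int × σ) :
    ∀ (xs : List Nat) (fm : List (List Int)) (s : σ) (r0 : List Int),
      xs.foldl (fun st x => (st.1.modify y (fun r => r.set x (F x st.2).1), (F x st.2).2)) (fm, s)
        = (fm.modify y (fun r => (xs.foldl (fun p x => (p.1.set x (F x p.2).1, (F x p.2).2)) (r, s)).1),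
           (xs.foldl (fun p x => (p.1.set x (F x p.2).1, (F x p.2).2)) (r0, s)).2) := by
  intro xs
  induction xs with
  | nil => intro fm s r0; simp [modify_id']
  | cons x xs ih =>
    intro fm s r0
    simp only [List.foldl_cons]
    rw [ih _ _ (r0.set x (F x s).1), modify_modify]

theorem rowfold (which : Int) (h y : Nat) (Mrow : List Int) :
    ∀ (n x : Nat) (s : Int × Int × Int) (r : List Int), x + n ≤ r.length →
      (List.range' x n).foldl
          (fun p u => (p.1.set u (cellA which h y u (Mrow.getD u 0) p.2).1,
                       (cellA which h y u (Mrow.getD u 0) p.2).2)) (r, s)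
        = (r.take x
             ++ (rowGo which h y x ((List.range' x n).map (fun u => Mrow.getD u 0)) s).1
             ++ r.drop (x + n),
           (rowGo which h y x ((List.range' x n).map (fun u => Mrow.getD u 0)) s).2) := by
  intro n
  induction n with
  | zero => intro x s r hle; simp [rowGo]
  | succ n ih =>
    intro x s r hle
    have hx : x < r.length := by omega
    rw [List.range'_succ]
    simp only [List.foldl_cons, List.map_cons, rowGo]
    rw [ih (x + 1) _ (r.set x (cellA which h y x (Mrow.getD x 0) s).1) (by simp; omega)]
    have hset : r.set x (cellA which h y x (Mrow.getD x 0) s).1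
        = r.take x ++ (cellA which h y x (Mrow.getD x 0) s).1 :: r.drop (x + 1) := by
      rw [List.set_eq_take_append_cons_drop]; simp [hx]
    rw [Prod.mk.injEq]
    refine ⟨?_, rfl⟩
    rw [hset, List.take_append, List.drop_append]
    have hlt : (List.take x r).length = x := by simp; omega
    rw [hlt]
    simp
    have h1 : List.take (x + 1) (List.take x r) = List.take x r := by
      rw [List.take_take]; congr 1; omega
    have h2 : List.drop (x + 1 + n) (List.take x r) = [] := by
      apply List.drop_eq_nil_of_le; simp; omega
    have h3 : x + 1 + n - x = n + 1 := by omega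
    rw [h1, h2, h3, List.drop_succ_cons, List.drop_drop]
    have h4 : x + 1 + n = x + (n + 1) := by omega
    simp [h4]

theorem rowGo_length (which : Int) (h y : Nat) :
    ∀ (x : Nat) (vs : List Int) (s : Int × Int × Int), (rowGo which h y x vs s).1.length = vs.length := by
  intro x vs
  induction vs generalizing x with
  | nil => intro s; rfl
  | cons v vs ih => intro s; simp [rowGo, ih]

theorem map_range'_getD {α : Type} (d : α) :
    ∀ (n x : Nat) (l : List α), x + n ≤ l.length →
      (List.range' x n).map (fun u => l.getD u d) = (l.drop x).take n := by
  intro n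
  induction n with
  | zero => intro x l h; simp
  | succ n ih =>
    intro x l h
    have hx : x < l.length := by omega
    rw [List.range'_succ, List.map_cons, ih (x + 1) l (by omega),
        List.drop_eq_getElem_cons hx]
    simp [List.getD_eq_getElem?_getD, List.getElem?_eq_getElem hx]
    rw [List.drop_eq_getElem_cons hx, List.take_succ_cons]

theorem matfold (which : Int) (h w : Nat) (Matrix : List (List Int)) :
    ∀ (n y : Nat) (s : Int × Int × Int) (fm : List (List Int)),
      y + n ≤ fm.length → (∀ r ∈ fm, r.length = w) →
      (∀ u ∈ List.range' y n, w ≤ (Matrix.getD u []).length) →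
      (List.range' y n).foldl (fun st yy =>
          (List.range w).foldl (fun st x =>
            (st.1.modify yy (fun r => r.set x (cellA which h yy x ((Matrix.getD yy []).getD x 0) st.2).1),
             (cellA which h yy x ((Matrix.getD yy []).getD x 0) st.2).2)) st) (fm, s)
        = (fm.take y
             ++ (matGo which h y ((List.range' y n).map (fun u => (Matrix.getD u []).take w)) s).1
             ++ fm.drop (y + n),
           (matGo which h y ((List.range' y n).map (fun u => (Matrix.getD u []).take w)) s).2) := by
  intro n
  induction n with
  | zero => intro y s fm h1 h2 h3; simp [matGo]
  | succ n ih =>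
    intro y s fm h1 h2 h3
    have hy : y < fm.length := by omega
    have hmem : fm.getD y [] ∈ fm := by
      simp [List.getD_eq_getElem?_getD, List.getElem?_eq_getElem hy, List.getElem_mem]
    have hrowlen : (fm.getD y []).length = w := h2 _ hmem
    have hMlen : w ≤ (Matrix.getD y []).length := h3 y (by simp)
    rw [List.range'_succ, List.foldl_cons]
    have hsplit := foldl_modify_split y
      (fun x s => ((cellA which h y x ((Matrix.getD y []).getD x 0) s).1,
                   (cellA which h y x ((Matrix.getD y []).getD x 0) s).2))
      (List.range w) fm s (fm.getD y [])
    simp only [] at hsplit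
    rw [hsplit, modify_eq_set _ _ _ [] hy, List.range_eq_range',
        rowfold which h y (Matrix.getD y []) w 0 s (fm.getD y []) (by omega),
        map_range'_getD 0 w 0 (Matrix.getD y []) (by omega)]
    simp only [List.take_zero, List.drop_zero, List.nil_append, Nat.zero_add]
    have hdrop : (fm.getD y []).drop w = [] := by
      apply List.drop_eq_nil_of_le; omega
    rw [hdrop, List.append_nil]
    set newrow := (rowGo which h y 0 ((Matrix.getD y []).take w) s).1 with hnr
    set s' := (rowGo which h y 0 ((Matrix.getD y []).take w) s).2 with hs'
    have hlen' : (fm.set y newrow).length = fm.length := by simp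
    have hrows' : ∀ r ∈ fm.set y newrow, r.length = w := by
      intro r hr
      rcases List.mem_or_eq_of_mem_set hr with hr' | hr'
      · exact h2 _ hr'
      · subst hr'; rw [hnr, rowGo_length, List.length_take]; omega
    rw [show List.range' 0 w = List.range w from List.range_eq_range'.symm]
    rw [ih (y + 1) s' (fm.set y newrow) (by omega) hrows'
        (fun u hu => h3 u (by simp at hu ⊢; omega))]
    have hset : fm.set y newrow = fm.take y ++ newrow :: fm.drop (y + 1) := by
      rw [List.set_eq_take_append_cons_drop]; simp [hy]
    rw [Prod.mk.injEq]
    constructor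
    · rw [hset, List.take_append, List.drop_append]
      have hlt : (List.take y fm).length = y := by simp; omega
      rw [hlt]
      simp only [matGo, List.map_cons]
      have h1' : List.take (y + 1) (List.take y fm) = List.take y fm := by
        rw [List.take_take]; congr 1; omega
      have h2' : List.drop (y + 1 + n) (List.take y fm) = [] := by
        apply List.drop_eq_nil_of_le; simp; omega
      have h3' : y + 1 + n - y = n + 1 := by omega
      rw [h1', h2', h3', List.drop_succ_cons, List.drop_drop]
      have h4 : n + (y + 1) = y + (n + 1) := by omega
      simp only [List.append_assoc, List.cons_append, List.nil_append, List.append_cancel_left_eq]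
      have h5 : y + 1 - y = 1 := by omega
      have h6 : y + 1 + n = y + (n + 1) := by omega
      rw [h5, h6, hnr, hs']
      simp
    · simp only [matGo, List.map_cons]
      rw [hs']

-- A computes matGo over the truncated grid
theorem A_char (Matrix : List (List Int)) (which : Int) (hpre : Pre_leaveOneEnd Matrix which) :
    leaveOneEnd Matrix which
      = (let g := matGo which Matrix.length 0
                    (Matrix.map (fun row => row.take Matrix.headI.length)) (0, 0, 0)
         (g.1, g.2.1, g.2.2.1)) := by
  obtain ⟨hne, hrows⟩ := hpre
  simp only [leaveOneEnd]
  have hfun : (fun (st : List (List Int) × Int × Int × Int) (y : Nat) =>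
      (List.range Matrix.headI.length).foldl (fun st x =>
        let item := (Matrix.getD y []).getD x 0
        if item = 2 then
          if st.2.2.2 = which then
            (st.1.modify y (fun r => r.set x 2), (x : Int),
             (if (y : Int) + 1 > (Matrix.length : Int) - 1 then (y : Int) else (y : Int) + 1),
             st.2.2.2 + 1)
          else
            (st.1.modify y (fun r => r.set x 0), st.2.1, st.2.2.1, st.2.2.2 + 1)
        else
          (st.1.modify y (fun r => r.set x item), st.2.1, st.2.2.1, st.2.2.2)) st)
      = (fun (st : List (List Int) × Int × Int × Int) (y : Nat) =>
      (List.range Matrix.headI.length).foldl (fun st x =>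
        (st.1.modify y (fun r => r.set x (cellA which Matrix.length y x ((Matrix.getD y []).getD x 0) st.2).1),
         (cellA which Matrix.length y x ((Matrix.getD y []).getD x 0) st.2).2)) st) := by
    funext st y
    congr 1
    funext st' x
    simp only [cellA]
    split_ifs <;> rfl
  rw [hfun, List.range_eq_range' (n := Matrix.length)]
  have hlenr : (List.replicate Matrix.length (List.replicate Matrix.headI.length (0 : Int))).length
      = Matrix.length := by simp
  rw [matfold which Matrix.length Matrix.headI.length Matrix Matrix.length 0 (0, 0, 0) _
        (by rw [hlenr]; omega) (by intro r hr; simp at hr; simp [hr.2])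
        (by intro u hu
            simp at hu
            have : Matrix.getD u [] ∈ Matrix := by
              rw [List.getD_eq_getElem?_getD, List.getElem?_eq_getElem hu]
              exact List.getElem_mem hu
            exact hrows _ this)]
  have hmaps : (List.range' 0 Matrix.length).map (fun u => (Matrix.getD u []).take Matrix.headI.length)
      = Matrix.map (fun row => row.take Matrix.headI.length) := by
    have h0 := map_range'_getD ([] : List Int) Matrix.length 0 Matrix (by omega)
    have h1 : Matrix.map (fun row => row.take Matrix.headI.length)
        = ((List.range' 0 Matrix.length).map (fun u => Matrix.getD u [])).map
            (fun row => row.take Matrix.headI.length) := by rw [h0]; simp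
    rw [h1, List.map_map]
    rfl
  rw [hmaps]
  simp

theorem filterMap_rowT (Mrow : List Int) (y : Nat) :
    ∀ (n x : Nat),
      (List.range' x n).filterMap (fun u => if Mrow.getD u 0 = 2 then some (y, u) else none)
        = (rowT ((List.range' x n).map (fun u => Mrow.getD u 0)) x).map (fun j => (y, j)) := by
  intro n
  induction n with
  | zero => intro x; simp [rowT]
  | succ n ih =>
    intro x
    rw [List.range'_succ, List.filterMap_cons, List.map_cons]
    rw [ih (x + 1)]
    simp only [rowT]
    split_ifs <;> simp

theorem flatMap_tgts (grid : List (List Int)) (w : Nat) :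
    ∀ (n y : Nat), (∀ u ∈ List.range' y n, (grid.getD u []).length = w) →
      (List.range' y n).flatMap (fun u =>
          (List.range w).filterMap (fun x =>
            if (grid.getD u []).getD x 0 = 2 then some (u, x) else none))
        = tgts ((List.range' y n).map (fun u => grid.getD u [])) y := by
  intro n
  induction n with
  | zero => intro y _; simp [tgts]
  | succ n ih =>
    intro y hw
    have hwy : (grid.getD y []).length = w := hw y (by simp)
    rw [List.range'_succ, List.flatMap_cons, List.map_cons]
    have hin : (List.range w).filterMap (fun x =>
        if (grid.getD y []).getD x 0 = 2 then some (y, x) else none)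
        = (rowT (grid.getD y []) 0).map (fun j => (y, j)) := by
      rw [List.range_eq_range', filterMap_rowT, map_range'_getD 0 w 0 _ (by omega),
          List.drop_zero, show (grid.getD y []).take w = grid.getD y [] from by
            rw [← hwy]; exact List.take_length]
    rw [hin, ih (y + 1) (fun u hu => hw u (by simp at hu ⊢; omega))]
    simp [tgts]

-- B's target comprehension is tgts of the grid
theorem B_char (Matrix : List (List Int)) (which : Int) (hpre : Pre_leaveOneEnd Matrix which) :
    leaveOneEnd_alt Matrix which
      = (let grid := Matrix.map (fun row => row.take Matrix.headI.length)
         let T := tgts grid 0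
         if 0 ≤ which ∧ which < (T.length : Int) then
           let t := T.getD which.toNat (0, 0)
           ((grid.map filt).modify t.1 (fun r => r.set t.2 2), (t.2 : Int),
            if (t.1 : Int) + 1 > (Matrix.length : Int) - 1 then (t.1 : Int) else (t.1 : Int) + 1)
         else (grid.map filt, 0, 0)) := by
  obtain ⟨hne, hrows⟩ := hpre
  simp only [leaveOneEnd_alt, filt]
  have hgl : ∀ u ∈ List.range' 0 Matrix.length,
      ((Matrix.map (fun row => row.take Matrix.headI.length)).getD u []).length
        = Matrix.headI.length := by
    intro u hu
    simp only [List.mem_range'_1, Nat.zero_add] at hu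
    have hu' : u < Matrix.length := by omega
    rw [List.getD_eq_getElem?_getD, List.getElem?_map, List.getElem?_eq_getElem hu']
    simp only [Option.map_some, Option.getD_some, List.length_take]
    have := hrows _ (List.getElem_mem hu')
    omega
  have ht := flatMap_tgts (Matrix.map (fun row => row.take Matrix.headI.length))
    Matrix.headI.length Matrix.length 0 hgl
  have hgrid : (List.range' 0 Matrix.length).map
      (fun u => (Matrix.map (fun row => row.take Matrix.headI.length)).getD u [])
      = Matrix.map (fun row => row.take Matrix.headI.length) := by
    have := map_range'_getD ([] : List Int) Matrix.length 0
      (Matrix.map (fun row => row.take Matrix.headI.length)) (by simp)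
    have h2 : List.take Matrix.length (Matrix.map (fun row => row.take Matrix.headI.length))
        = Matrix.map (fun row => row.take Matrix.headI.length) := by
      apply List.take_of_length_le; simp
    simpa [h2] using this
  rw [hgrid] at ht
  rw [List.range_eq_range' (n := Matrix.length), ht]
  rfl

theorem rowT_cons_shift : ∀ (r : List Int) (x : Nat), rowT r (x + 1) = (rowT r x).map (fun j => j + 1) := by
  intro r
  induction r with
  | nil => intro x; simp [rowT]
  | cons v vs ih => intro x; simp only [rowT]; split_ifs <;> simp [ih (x + 1)]

theorem rowT_len : ∀ (r : List Int) (x : Nat), (rowT r x).length = (rowT r 0).length := by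
  intro r
  induction r with
  | nil => intro x; simp [rowT]
  | cons v vs ih =>
    intro x
    simp only [rowT]
    split_ifs <;> simp [ih (x + 1), ih 1]

theorem tgts_shift : ∀ (rs : List (List Int)) (y : Nat),
    tgts rs (y + 1) = (tgts rs y).map (fun p => (p.1 + 1, p.2)) := by
  intro rs
  induction rs with
  | nil => intro y; simp [tgts]
  | cons r rs ih => intro y; simp [tgts, ih (y + 1), List.map_map]

theorem tgts_len : ∀ (rs : List (List Int)) (y : Nat), (tgts rs y).length = (tgts rs 0).length := by
  intro rs
  induction rs with
  | nil => intro y; simp [tgts]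
  | cons r rs ih => intro y; simp [tgts, ih (y + 1), ih 1]

theorem rowGo_miss (which : Int) (h y : Nat) :
    ∀ (r : List Int) (x : Nat) (oX oY c : Int),
      (which < c ∨ c + ((rowT r 0).length : Int) ≤ which) →
      rowGo which h y x r (oX, oY, c) = (filt r, (oX, oY, c + (rowT r 0).length)) := by
  intro r
  induction r with
  | nil => intro x oX oY c hc; simp [rowGo, filt, rowT]
  | cons v vs ih =>
    intro x oX oY c hc
    by_cases h2 : v = 2
    · subst h2
      have hl : (rowT ((2 : Int) :: vs) 0).length = (rowT vs 0).length + 1 := by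
        simp [rowT, rowT_len vs 1]
      rw [hl] at hc
      have hne : ¬ (c = which) := by push_cast at hc; omega
      have hrest := ih (x + 1) oX oY (c + 1) (by push_cast at hc ⊢; omega)
      simp only [rowGo, cellA, if_pos rfl, hne, if_false, if_true]
      rw [hrest]
      simp [filt, hl]
      push_cast
      ring
    · have hl : rowT (v :: vs) 0 = rowT vs 1 := by simp [rowT, h2]
      rw [hl, rowT_len vs 1] at hc
      have hrest := ih (x + 1) oX oY c (by exact hc)
      simp only [rowGo, cellA, h2, if_false]
      rw [hrest]
      simp [filt, h2, hl, rowT_len vs 1]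

theorem getD_map_add_one (l : List Nat) (i : Nat) (hi : i < l.length) :
    (l.map (fun j => j + 1)).getD i 0 = l.getD i 0 + 1 := by
  rw [List.getD_eq_getElem?_getD, List.getD_eq_getElem?_getD, List.getElem?_map,
      List.getElem?_eq_getElem hi]
  simp

theorem rowGo_hit (which : Int) (h y : Nat) :
    ∀ (r : List Int) (x : Nat) (oX oY c : Int),
      c ≤ which → which < c + ((rowT r 0).length : Int) →
      rowGo which h y x r (oX, oY, c)
        = ((filt r).set ((rowT r 0).getD (which - c).toNat 0) 2,
           (((x + (rowT r 0).getD (which - c).toNat 0 : Nat) : Int),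
            (if (y : Int) + 1 > (h : Int) - 1 then (y : Int) else (y : Int) + 1),
            c + (rowT r 0).length)) := by
  intro r
  induction r with
  | nil => intro x oX oY c h1 h2; simp [rowT] at h2; omega
  | cons v vs ih =>
    intro x oX oY c h1 h2
    by_cases hv : v = 2
    · subst hv
      have hl : rowT ((2 : Int) :: vs) 0 = 0 :: (rowT vs 0).map (fun j => j + 1) := by
        simp [rowT, rowT_cons_shift vs 0]
      have hll : (rowT ((2 : Int) :: vs) 0).length = (rowT vs 0).length + 1 := by
        rw [hl]; simp
      by_cases hc : c = which
      · subst hc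
        have hk : (c - c).toNat = 0 := by omega
        have hmiss := rowGo_miss c h y vs (x + 1) (x : Int)
          (if (y : Int) + 1 > (h : Int) - 1 then (y : Int) else (y : Int) + 1) (c + 1)
          (by left; omega)
        simp only [rowGo, cellA, if_pos rfl, if_true]
        rw [hmiss, hl, hk]
        simp [filt, hll, hl]
        push_cast
        omega
      · have hcw : c < which := by omega
        have hb : which < c + 1 + ((rowT vs 0).length : Int) := by
          rw [hll] at h2; push_cast at h2 ⊢; omega
        have hrest := ih (x + 1) oX oY (c + 1) (by omega) hb
        simp only [rowGo, cellA, if_pos rfl,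
          show ¬ (c = which) from hc, if_false, if_true]
        rw [hrest, hl]
        have hk1 : (which - c).toNat = ((which - (c + 1)).toNat) + 1 := by omega
        have hkb : (which - (c + 1)).toNat < (rowT vs 0).length := by
          push_cast at hb; omega
        rw [hk1, List.getD_cons_succ, getD_map_add_one _ _ hkb]
        simp [filt, hll]
        push_cast
        omega
    · have hl : rowT (v :: vs) 0 = (rowT vs 0).map (fun j => j + 1) := by
        have := rowT_cons_shift vs 0
        simp only [rowT, hv, if_false]
        simpa using this
      have hb : which < c + ((rowT vs 0).length : Int) := by
        rw [hl] at h2; push_cast at h2 ⊢; simpa using h2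
      have hrest := ih (x + 1) oX oY c h1 hb
      simp only [rowGo, cellA, hv, if_false]
      rw [hrest, hl]
      have hkb : (which - c).toNat < (rowT vs 0).length := by push_cast at hb; omega
      rw [getD_map_add_one _ _ hkb]
      simp [filt, hv]
      push_cast
      omega

theorem matGo_miss (which : Int) (h : Nat) :
    ∀ (rows : List (List Int)) (y : Nat) (oX oY c : Int),
      (which < c ∨ c + ((tgts rows 0).length : Int) ≤ which) →
      matGo which h y rows (oX, oY, c) = (rows.map filt, (oX, oY, c + (tgts rows 0).length)) := by
  intro rows
  induction rows with
  | nil => intro y oX oY c hc; simp [matGo, tgts]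
  | cons r rs ih =>
    intro y oX oY c hc
    have hlen : (tgts (r :: rs) 0).length = (rowT r 0).length + (tgts rs 0).length := by
      simp [tgts, tgts_len rs 1]
    rw [hlen] at hc
    simp only [matGo]
    rw [rowGo_miss which h y r 0 oX oY c (by push_cast at hc ⊢; omega)]
    rw [ih (y + 1) oX oY (c + ((rowT r 0).length : Int)) (by push_cast at hc ⊢; omega)]
    simp [hlen]
    push_cast
    ring

theorem getD_append_left' {α : Type} (l1 l2 : List α) (i : Nat) (d : α) (hi : i < l1.length) :
    (l1 ++ l2).getD i d = l1.getD i d := by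
  rw [List.getD_eq_getElem?_getD, List.getD_eq_getElem?_getD,
      List.getElem?_append_left hi]

theorem getD_append_right' {α : Type} (l1 l2 : List α) (i : Nat) (d : α) (hi : l1.length ≤ i) :
    (l1 ++ l2).getD i d = l2.getD (i - l1.length) d := by
  rw [List.getD_eq_getElem?_getD, List.getD_eq_getElem?_getD,
      List.getElem?_append_right hi]

theorem getD_map_pair (l : List Nat) (y : Nat) (i : Nat) (hi : i < l.length) :
    (l.map (fun j => ((y, j) : Nat × Nat))).getD i (0, 0) = (y, l.getD i 0) := by
  rw [List.getD_eq_getElem?_getD, List.getD_eq_getElem?_getD, List.getElem?_map,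
      List.getElem?_eq_getElem hi]
  simp

theorem getD_map_shift (l : List (Nat × Nat)) (i : Nat) (hi : i < l.length) :
    (l.map (fun p => ((p.1 + 1, p.2) : Nat × Nat))).getD i (0, 0)
      = ((l.getD i (0, 0)).1 + 1, (l.getD i (0, 0)).2) := by
  rw [List.getD_eq_getElem?_getD, List.getD_eq_getElem?_getD, List.getElem?_map,
      List.getElem?_eq_getElem hi]
  simp

theorem matGo_hit (which : Int) (h : Nat) :
    ∀ (rows : List (List Int)) (y : Nat) (oX oY c : Int),
      c ≤ which → which < c + ((tgts rows 0).length : Int) →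
      matGo which h y rows (oX, oY, c)
        = ((rows.map filt).modify ((tgts rows 0).getD (which - c).toNat (0, 0)).1
             (fun rr => rr.set ((tgts rows 0).getD (which - c).toNat (0, 0)).2 2),
           ((((tgts rows 0).getD (which - c).toNat (0, 0)).2 : Int),
            (if ((y + ((tgts rows 0).getD (which - c).toNat (0, 0)).1 : Nat) : Int) + 1 > (h : Int) - 1
             then ((y + ((tgts rows 0).getD (which - c).toNat (0, 0)).1 : Nat) : Int)
             else ((y + ((tgts rows 0).getD (which - c).toNat (0, 0)).1 : Nat) : Int) + 1),
            c + (tgts rows 0).length)) := by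
  intro rows
  induction rows with
  | nil => intro y oX oY c h1 h2; simp [tgts] at h2; omega
  | cons r rs ih =>
    intro y oX oY c h1 h2
    have hlen : (tgts (r :: rs) 0).length = (rowT r 0).length + (tgts rs 0).length := by
      simp [tgts, tgts_len rs 1]
    have htc : tgts (r :: rs) 0 = (rowT r 0).map (fun j => ((0, j) : Nat × Nat)) ++ tgts rs 1 := by
      simp [tgts]
    by_cases hcase : which < c + ((rowT r 0).length : Int)
    · have hk : (which - c).toNat < (rowT r 0).length := by omega
      have hrow := rowGo_hit which h y r 0 oX oY c h1 (by push_cast; omega)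
      simp only [matGo]
      rw [hrow]
      rw [matGo_miss which h rs (y + 1) _ _ (c + ((rowT r 0).length : Int)) (by left; omega)]
      rw [htc, getD_append_left' _ _ _ _ (by simpa using hk), getD_map_pair _ _ _ hk]
      simp [List.modify, hlen, tgts_len rs 1]
      push_cast
      ring
    · have hkn : (rowT r 0).length ≤ (which - c).toNat := by omega
      have hrow := rowGo_miss which h y r 0 oX oY c (by right; push_cast; omega)
      have hb2 : which < c + ((rowT r 0).length : Int) + ((tgts rs 0).length : Int) := by
        rw [hlen] at h2; push_cast at h2 ⊢; omega
      have hrest := ih (y + 1) oX oY (c + ((rowT r 0).length : Int)) (by omega)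
        (by push_cast; omega)
      simp only [matGo]
      rw [hrow, hrest]
      have hsh : tgts rs 1 = (tgts rs 0).map (fun p => ((p.1 + 1, p.2) : Nat × Nat)) :=
        tgts_shift rs 0
      have hib : (which - (c + ((rowT r 0).length : Int))).toNat < (tgts rs 0).length := by
        omega
      have hi2 : (which - c).toNat - (rowT r 0).length
          = (which - (c + ((rowT r 0).length : Int))).toNat := by omega
      rw [htc, getD_append_right' _ _ _ _ (by simpa using hkn), hsh]
      rw [show ((rowT r 0).map (fun j => ((0, j) : Nat × Nat))).length = (rowT r 0).length from by simp]
      rw [hi2, getD_map_shift _ _ hib]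
      set t := (tgts rs 0).getD (which - (c + ((rowT r 0).length : Int))).toNat (0, 0) with hT
      have hyy : y + (t.1 + 1) = y + 1 + t.1 := by omega
      simp only [List.map_cons]
      simp [modify_cons_succ, hlen, tgts_len rs 1, hyy]
      push_cast
      ring

-- ===== VERDICT (by name: the statement is the Claim_ definition above) =====
theorem leaveOneEnd_spec : Claim_equal_leaveOneEnd := by
  intro Matrix which _ hpre
  unfold Spec_leaveOneEnd
  rw [A_char Matrix which hpre, B_char Matrix which hpre]
  simp only []
  by_cases hc : 0 ≤ which ∧
      which < ((tgts (Matrix.map (fun row => row.take Matrix.headI.length)) 0).length : Int)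
  · rw [if_pos hc]
    have hmg := matGo_hit which Matrix.length
      (Matrix.map (fun row => row.take Matrix.headI.length)) 0 0 0 0 hc.1
      (by simpa using hc.2)
    rw [show which - 0 = which from by omega] at hmg
    rw [hmg]
    simp
  · rw [if_neg hc]
    have hmg := matGo_miss which Matrix.length
      (Matrix.map (fun row => row.take Matrix.headI.length)) 0 0 0 0
      (by push_cast at hc ⊢; omega)
    rw [hmg]
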